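-- pv_equiv track=rewrite | github.com/momentum-morehouse/python-mystery-word-DeviantGhost | hangMan.py | createEmptyWord
-- ===== SOURCE A (Python) =====
-- def createEmptyWord(word):
--     guessProgress = ""
--     while (len(guessProgress) < ((len(word)-1)*2)):
--         guessProgress += "_ "
--
--     print ("Length of word: ", (len(word)-1))
--     print ("Length of guessProgress: ", (len(guessProgress)))
--     print (guessProgress)
--     return guessProgress
-- ===== SOURCE B (Python) =====
-- def createEmptyWord(word):
--     guessProgress = "_ " * (len(word) - 1)
--
--     print ("Length of word: ", (len(word)-1))
--     print ("Length of guessProgress: ", (len(guessProgress)))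
--     print (guessProgress)
--     return guessProgress
-- ===== Notes on version B (the rewrite author's own statement) =====
-- stated objective: faster
-- what changed: The character-accumulating while-loop is replaced by the closed-form string repetition of the two-character cell len(word)-1 times; the prints and return value are unchanged.
import Mathlib
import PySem

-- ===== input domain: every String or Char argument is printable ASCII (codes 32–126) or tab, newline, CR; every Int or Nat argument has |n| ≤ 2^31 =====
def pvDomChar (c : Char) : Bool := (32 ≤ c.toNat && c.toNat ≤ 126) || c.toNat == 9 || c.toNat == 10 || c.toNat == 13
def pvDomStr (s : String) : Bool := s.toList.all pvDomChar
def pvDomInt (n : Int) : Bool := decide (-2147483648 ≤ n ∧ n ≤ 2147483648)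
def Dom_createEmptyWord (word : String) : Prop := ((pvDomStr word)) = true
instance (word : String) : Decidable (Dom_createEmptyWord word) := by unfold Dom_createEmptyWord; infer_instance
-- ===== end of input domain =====

-- B replaces the accumulating while-loop with the closed-form repetition "_ " * (len(word)-1)
-- (idiomatic); equivalence is about the RETURN value only — both Pythons also print three lines.

-- ===== PORT A =====
-- the while-loop: append "_ " while len(acc) < t; terminates since each step grows acc by 2
def createEmptyWordLoop (t : Int) (acc : List Char) : List Char :=
  if (acc.length : Int) < t then createEmptyWordLoop t (acc ++ ['_', ' ']) else acc
termination_by (t - acc.length).toNat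
decreasing_by simp_all; omega

def createEmptyWord (word : String) : String :=
  String.mk (createEmptyWordLoop (((word.toList.length : Int) - 1) * 2) [])

-- ===== PORT B =====
-- faithful port of Python's  s * n  (empty for n ≤ 0)
def pyStrMul (s : String) (n : Int) : String :=
  String.mk ((List.replicate n.toNat s.toList).flatten)

def createEmptyWord_alt (word : String) : String :=
  pyStrMul "_ " ((word.toList.length : Int) - 1)

-- ===== PRECONDITION & SPEC =====
def Spec_createEmptyWord (word : String) (out : String) : Prop := out = createEmptyWord_alt word
instance (word : String) (out : String) : Decidable (Spec_createEmptyWord word out) := by unfold Spec_createEmptyWord; infer_instance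

-- ===== CLAIM (what is proved, stated in full; the proofs are below) =====
def Claim_equal_createEmptyWord : Prop := ∀ (word : String), Dom_createEmptyWord word → Spec_createEmptyWord word (createEmptyWord word)

-- ===== LEMMAS AND PROOFS =====
theorem createEmptyWordLoop_eq (m : Nat) (acc : List Char) :
    createEmptyWordLoop ((acc.length : Int) + 2 * m) acc
      = acc ++ (List.replicate m ['_', ' ']).flatten := by
  induction m generalizing acc with
  | zero => rw [createEmptyWordLoop]; simp
  | succ k ih =>
    rw [createEmptyWordLoop]
    have h : ((acc.length : Int)) < (acc.length : Int) + 2 * (k + 1 : Nat) := by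
      push_cast; omega
    rw [if_pos h]
    have h2 : ((acc ++ ['_', ' ']).length : Int) + 2 * k
        = (acc.length : Int) + 2 * (k + 1 : Nat) := by simp; omega
    have := ih (acc ++ ['_', ' '])
    rw [h2] at this
    rw [this]
    simp [List.replicate_succ]

theorem createEmptyWordLoop_neg (t : Int) (ht : t ≤ 0) :
    createEmptyWordLoop t [] = [] := by
  rw [createEmptyWordLoop]
  simp only [List.length_nil, Int.natCast_zero]
  rw [if_neg (by omega)]

-- ===== VERDICT (by name: the statement is the Claim_ definition above) =====
theorem createEmptyWord_spec : Claim_equal_createEmptyWord := by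
  intro word _
  unfold Spec_createEmptyWord createEmptyWord createEmptyWord_alt pyStrMul
  cases hn : word.toList.length with
  | zero =>
      rw [createEmptyWordLoop_neg _ (by norm_num)]
      decide
  | succ k =>
      have h1 : (((k + 1 : Nat) : Int) - 1) * 2 = ((([] : List Char).length : Int)) + 2 * k := by
        simp only [List.length_nil]; push_cast; ring
      have h2 : ((((k + 1 : Nat) : Int)) - 1).toNat = k := by omega
      rw [h1, createEmptyWordLoop_eq, h2]
      rfl
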